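-- pv_equiv track=rewrite | github.com/DoIcode-404/HomeService-App | Desktop/FInalProject/server/utils/house_analysis.py | _determine_house_quality
-- ===== SOURCE A (Python) =====
-- from typing import Dict, List, Optional, Tuple
--
-- def _determine_house_quality(house_num: int, planets_in_house: List[str]) -> str:
--     """
--     Determine overall quality (benefic/malefic) of a house.
--
--     Args:
--         house_num: House number
--         planets_in_house: List of planets
--
--     Returns:
--         Quality assessment
--     """
--     benefic_planets = ['Sun', 'Moon', 'Jupiter', 'Venus', 'Mercury']
--     malefic_planets = ['Mars', 'Saturn', 'Rahu', 'Ketu']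
--
--     benefic_count = sum(1 for p in planets_in_house if p in benefic_planets)
--     malefic_count = sum(1 for p in planets_in_house if p in malefic_planets)
--
--     if benefic_count > malefic_count:
--         return 'Benefic (Favorable)'
--     elif malefic_count > benefic_count:
--         return 'Malefic (Challenging)'
--     else:
--         return 'Neutral (Balanced)'
-- ===== SOURCE B (Python) =====
-- PLANET_SCORE = {
--     'Sun': 1, 'Moon': 1, 'Jupiter': 1, 'Venus': 1, 'Mercury': 1,
--     'Mars': -1, 'Saturn': -1, 'Rahu': -1, 'Ketu': -1,
-- }
--
-- def _determine_house_quality(house_num, planets_in_house):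
--     score = 0
--     for p in planets_in_house:
--         score += PLANET_SCORE.get(p, 0)
--     if score > 0:
--         return 'Benefic (Favorable)'
--     if score < 0:
--         return 'Malefic (Challenging)'
--     return 'Neutral (Balanced)'
-- ===== Notes on version B (the rewrite author's own statement) =====
-- stated objective: simpler
-- what changed: Replaces A's two counting passes (benefic count, malefic count) with a single pass keeping one net score driven by a planet->(+1/-1) table, then classifies by the sign of the score.
import Mathlib
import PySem

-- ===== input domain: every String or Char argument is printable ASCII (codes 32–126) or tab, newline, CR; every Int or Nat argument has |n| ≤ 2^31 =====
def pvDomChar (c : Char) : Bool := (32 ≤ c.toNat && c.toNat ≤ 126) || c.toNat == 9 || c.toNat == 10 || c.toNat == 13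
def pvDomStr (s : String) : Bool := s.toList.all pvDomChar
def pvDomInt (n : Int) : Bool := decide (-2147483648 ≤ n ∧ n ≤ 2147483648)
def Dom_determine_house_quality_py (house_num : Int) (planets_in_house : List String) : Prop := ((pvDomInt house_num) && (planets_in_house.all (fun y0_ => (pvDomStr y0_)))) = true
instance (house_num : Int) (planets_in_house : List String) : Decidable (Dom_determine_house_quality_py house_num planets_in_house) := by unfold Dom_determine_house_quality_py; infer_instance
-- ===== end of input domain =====

-- B replaces A's two counting passes with a single pass keeping one net score
-- driven by a planet→(+1/−1) table; same results, simpler decomposition.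

-- ===== PORT A =====
def pvBenefic : List String := ["Sun", "Moon", "Jupiter", "Venus", "Mercury"]
def pvMalefic : List String := ["Mars", "Saturn", "Rahu", "Ketu"]

def determine_house_quality_py (house_num : Int) (planets_in_house : List String) : String :=
  let benefic_count : Int :=
    planets_in_house.foldl (fun acc p => acc + (if p ∈ pvBenefic then 1 else 0)) 0
  let malefic_count : Int :=
    planets_in_house.foldl (fun acc p => acc + (if p ∈ pvMalefic then 1 else 0)) 0
  if benefic_count > malefic_count then "Benefic (Favorable)"
  else if malefic_count > benefic_count then "Malefic (Challenging)"
  else "Neutral (Balanced)"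

-- ===== PORT B =====
def pvPlanetScore : PySem.Dict String Int :=
  PySem.Dict.ofList
    [("Sun", 1), ("Moon", 1), ("Jupiter", 1), ("Venus", 1), ("Mercury", 1),
     ("Mars", -1), ("Saturn", -1), ("Rahu", -1), ("Ketu", -1)]

def determine_house_quality_py_alt (house_num : Int) (planets_in_house : List String) : String :=
  let score : Int :=
    planets_in_house.foldl (fun s p => s + PySem.Dict.getD pvPlanetScore p 0) 0
  if score > 0 then "Benefic (Favorable)"
  else if score < 0 then "Malefic (Challenging)"
  else "Neutral (Balanced)"

-- ===== PRECONDITION & SPEC =====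
def Spec_determine_house_quality_py (house_num : Int) (planets_in_house : List String) (out : String) : Prop := out = determine_house_quality_py_alt house_num planets_in_house
instance (house_num : Int) (planets_in_house : List String) (out : String) : Decidable (Spec_determine_house_quality_py house_num planets_in_house out) := by unfold Spec_determine_house_quality_py; infer_instance

-- ===== CLAIM (what is proved, stated in full; the proofs are below) =====
def Claim_equal_determine_house_quality_py : Prop := ∀ (house_num : Int) (planets_in_house : List String), Dom_determine_house_quality_py house_num planets_in_house → Spec_determine_house_quality_py house_num planets_in_house (determine_house_quality_py house_num planets_in_house)

-- ===== LEMMAS AND PROOFS =====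

-- the per-planet score is exactly the benefic indicator minus the malefic indicator
lemma score_eq_indicators (p : String) :
    PySem.Dict.getD pvPlanetScore p 0 =
      (if p ∈ pvBenefic then (1 : Int) else 0) - (if p ∈ pvMalefic then (1 : Int) else 0) := by
  have h : pvPlanetScore =
      ((((((((PySem.Dict.empty.insert "Sun" 1).insert "Moon" 1).insert "Jupiter" 1).insert
        "Venus" 1).insert "Mercury" 1).insert "Mars" (-1)).insert "Saturn" (-1)).insert
        "Rahu" (-1)).insert "Ketu" (-1) := by decide
  rw [h]
  simp [PySem.Dict.getD_insert, PySem.Dict.getD_empty, pvBenefic, pvMalefic]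
  split_ifs <;> simp_all

lemma sum_map_sub (f g : String → Int) (xs : List String) :
    (xs.map (fun p => f p - g p)).sum = (xs.map f).sum - (xs.map g).sum := by
  induction xs with
  | nil => simp
  | cons x xs ih => simp [ih]; ring

theorem determine_house_quality_py_spec : Claim_equal_determine_house_quality_py := by
  intro house_num xs _
  show determine_house_quality_py house_num xs = determine_house_quality_py_alt house_num xs
  unfold determine_house_quality_py determine_house_quality_py_alt
  rw [PySem.List.foldl_add, PySem.List.foldl_add, PySem.List.foldl_add]
  have hpt : (xs.map (fun p => PySem.Dict.getD pvPlanetScore p 0)).sum =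
      (xs.map (fun p => if p ∈ pvBenefic then (1 : Int) else 0)).sum -
      (xs.map (fun p => if p ∈ pvMalefic then (1 : Int) else 0)).sum := by
    rw [← sum_map_sub]
    congr 1
    exact List.map_congr_left (fun p _ => score_eq_indicators p)
  simp only [zero_add, hpt]
  set b := (xs.map (fun p => if p ∈ pvBenefic then (1 : Int) else 0)).sum
  set m := (xs.map (fun p => if p ∈ pvMalefic then (1 : Int) else 0)).sum
  split_ifs <;> first | rfl | omega
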